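-- pv_equiv track=rewrite | github.com/Srinivas-18/VPN-Detection-De-anonymization-Tool | deanon/encrypted_traffic_analyzer.py | _detect_mtu_patterns
-- ===== SOURCE A (Python) =====
-- from typing import Dict, List, Tuple, Optional
--
-- def _detect_mtu_patterns(sizes: List[int]) -> Dict:
--     """Detect MTU-related patterns"""
--     if not sizes:
--         return {}
--
--     mtu_1500 = len([s for s in sizes if 1450 <= s <= 1500])
--     mtu_1492 = len([s for s in sizes if 1442 <= s <= 1492])
--
--     return {
--         'mtu_1500_packets': mtu_1500,
--         'mtu_1492_packets': mtu_1492,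
--         'fragmented_likely': len([s for s in sizes if s > 1500])
--     }
-- ===== SOURCE B (Python) =====
-- def _detect_mtu_patterns(sizes):
--     """Detect MTU-related patterns via a frequency table built in one pass."""
--     if not sizes:
--         return {}
--     freq = {}
--     for s in sizes:
--         freq[s] = freq.get(s, 0) + 1
--     return {
--         'mtu_1500_packets': sum(freq.get(k, 0) for k in range(1450, 1501)),
--         'mtu_1492_packets': sum(freq.get(k, 0) for k in range(1442, 1493)),
--         'fragmented_likely': sum(v for k, v in freq.items() if k > 1500),
--     }
-- ===== Notes on version B (the rewrite author's own statement) =====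
-- stated objective: alternative
-- what changed: Instead of scanning the list once per bucket, B builds a size-frequency dictionary in a single pass and derives each bucket by summing frequencies over the fixed key range (or over dict items with key > 1500), so no predicate scan over the packet list remains.
import Mathlib
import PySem

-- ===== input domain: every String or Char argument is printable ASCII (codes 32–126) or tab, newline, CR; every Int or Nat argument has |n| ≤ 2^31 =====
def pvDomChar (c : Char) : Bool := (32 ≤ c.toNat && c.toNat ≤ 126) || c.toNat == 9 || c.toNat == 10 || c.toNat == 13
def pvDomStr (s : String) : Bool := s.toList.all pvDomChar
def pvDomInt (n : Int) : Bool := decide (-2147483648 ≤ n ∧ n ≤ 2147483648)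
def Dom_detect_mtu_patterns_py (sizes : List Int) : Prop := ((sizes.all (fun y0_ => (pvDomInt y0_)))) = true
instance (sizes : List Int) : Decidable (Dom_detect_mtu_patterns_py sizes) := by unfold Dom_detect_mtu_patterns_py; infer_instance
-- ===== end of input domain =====

-- B replaces A's three predicate scans by one frequency dictionary read back over fixed key ranges (alternative data structure; return value only, no mutation).

-- ===== PORT A =====
-- Port of A: three list-comprehension filters, then the dict literal.
def detect_mtu_patterns_py (sizes : List Int) : List (String × Int) :=
  if sizes = [] then []
  else
    let mtu_1500 : Int := ((sizes.filter (fun s => 1450 ≤ s ∧ s ≤ 1500)).length : Int)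
    let mtu_1492 : Int := ((sizes.filter (fun s => 1442 ≤ s ∧ s ≤ 1492)).length : Int)
    [("mtu_1500_packets", mtu_1500),
     ("mtu_1492_packets", mtu_1492),
     ("fragmented_likely", ((sizes.filter (fun s => 1500 < s)).length : Int))]

-- ===== PORT B =====
-- Port of B: build freq once (freq[s] = freq.get(s,0)+1), then sum freq over the key ranges and over items with key > 1500.
def detect_mtu_patterns_py_alt (sizes : List Int) : List (String × Int) :=
  if sizes = [] then []
  else
    let freq : PySem.Dict Int Int :=
      sizes.foldl (fun d s => d.insert s (d.getD s 0 + 1)) PySem.Dict.empty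
    [("mtu_1500_packets",
        (PySem.List.pyRange 1450 1501 1).foldl (fun acc k => acc + freq.getD k 0) 0),
     ("mtu_1492_packets",
        (PySem.List.pyRange 1442 1493 1).foldl (fun acc k => acc + freq.getD k 0) 0),
     ("fragmented_likely",
        freq.items.foldl (fun acc p => if p.1 > 1500 then acc + p.2 else acc) 0)]

-- ===== PRECONDITION & SPEC =====
def Spec_detect_mtu_patterns_py (sizes : List Int) (out : List (String × Int)) : Prop := out = detect_mtu_patterns_py_alt sizes
instance (sizes : List Int) (out : List (String × Int)) : Decidable (Spec_detect_mtu_patterns_py sizes out) := by unfold Spec_detect_mtu_patterns_py; infer_instance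

-- ===== CLAIM =====
def Claim_equal_detect_mtu_patterns_py : Prop := ∀ (sizes : List Int), Dom_detect_mtu_patterns_py sizes → Spec_detect_mtu_patterns_py sizes (detect_mtu_patterns_py sizes)

-- ===== LEMMAS AND PROOFS =====

-- fold with conditional add = sum of a 0-padded map
lemma foldl_add_ite {α : Type} (l : List α) (q : α → Prop) [DecidablePred q] (f : α → Int) (c : Int) :
    l.foldl (fun acc p => if q p then acc + f p else acc) c
      = c + (l.map (fun p => if q p then f p else 0)).sum := by
  induction l generalizing c with
  | nil => simp
  | cons x xs ih => by_cases h : q x <;> simp [h, ih] <;> ring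

lemma foldl_add_map {α : Type} (l : List α) (f : α → Int) (c : Int) :
    l.foldl (fun acc k => acc + f k) c = c + (l.map f).sum := by
  induction l generalizing c with
  | nil => simp
  | cons x xs ih => simp [ih]; ring

-- one-hot sum over a Nodup list
lemma sum_one_hot (S : List Int) (x c : Int) (hnd : S.Nodup) :
    (S.map (fun k => if k = x then c else 0)).sum = if x ∈ S then c else 0 := by
  induction S with
  | nil => simp
  | cons r S ih =>
    rcases List.nodup_cons.mp hnd with ⟨hr, hnd'⟩
    by_cases h : r = x
    · subst h
      have : (S.map (fun k => if k = r then c else 0)).sum = 0 := by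
        rw [ih hnd']; simp [hr]
      simp [this]
    · have hxr : x ≠ r := fun hh => h hh.symm
      rw [List.map_cons, List.sum_cons, if_neg h, ih hnd', zero_add]
      by_cases hm : x ∈ S <;> simp [hm, hxr]

-- Σ_{k ∈ S} (if p k then count k xs else 0) = |filter p xs|, for S ⊇ xs, S Nodup
lemma sum_count_filter (S : List Int) (p : Int → Bool) (xs : List Int)
    (hnd : S.Nodup) (hsub : ∀ x ∈ xs, x ∈ S) :
    (S.map (fun k => if p k then (xs.count k : Int) else 0)).sum
      = ((xs.filter p).length : Int) := by
  induction xs with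
  | nil => simp
  | cons x xs ih =>
    have hx : x ∈ S := hsub x (List.mem_cons_self ..)
    have hsub' : ∀ y ∈ xs, y ∈ S := fun y hy => hsub y (List.mem_cons_of_mem _ hy)
    have hmap : (S.map (fun k => if p k then ((x :: xs).count k : Int) else 0))
        = S.map (fun k => (if p k then (xs.count k : Int) else 0)
            + (if k = x then (if p x then 1 else 0) else 0)) := by
      apply List.map_congr_left
      intro k _
      by_cases hk : k = x
      · subst hk
        rw [List.count_cons_self]
        by_cases hp : p k <;> simp [hp] <;> push_cast <;> ring
      · rw [List.count_cons_of_ne (Ne.symm hk), if_neg hk, add_zero]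
    rw [hmap, List.sum_map_add, ih hsub', sum_one_hot S x _ hnd, if_pos hx]
    by_cases hp : p x <;> simp [List.filter_cons, hp] <;> push_cast <;> ring

-- specialization: Σ_{k ∈ S} count k xs = |filter (· ∈ S) xs|, for S Nodup
lemma sum_count_mem (S xs : List Int) (hnd : S.Nodup) :
    (S.map (fun k => (xs.count k : Int))).sum
      = ((xs.filter (fun s => decide (s ∈ S))).length : Int) := by
  have h := sum_count_filter S (fun k => decide (k ∈ S)) (xs.filter (fun s => decide (s ∈ S))) hnd
    (by intro x hx; simpa using (List.of_mem_filter hx))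
  have hcnt : ∀ k : Int, (xs.filter (fun s => decide (s ∈ S))).count k
      = if k ∈ S then xs.count k else 0 := by
    intro k
    by_cases hk : k ∈ S
    · simp [hk, List.count_filter]
    · have h0 : (xs.filter (fun s => decide (s ∈ S))).count k = 0 :=
        List.count_eq_zero.mpr (fun hmem => hk (by simpa using List.of_mem_filter hmem))
      simp [hk, h0]
  have hfix : (xs.filter (fun s => decide (s ∈ S))).filter (fun k => decide (k ∈ S))
      = xs.filter (fun s => decide (s ∈ S)) := by
    apply List.filter_eq_self.mpr
    intro a ha; simpa using List.of_mem_filter ha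
  rw [hfix] at h
  rw [← h]
  apply congrArg
  apply List.map_congr_left
  intro k hk
  rw [hcnt k]
  simp [hk]

-- the freq fold is the Counter
lemma freq_eq_counter (sizes : List Int) :
    sizes.foldl (fun (d : PySem.Dict Int Int) s => d.insert s (d.getD s 0 + 1)) PySem.Dict.empty
      = PySem.Dict.counter sizes := PySem.Dict.foldl_insert_getD_add_one_eq_counter sizes

-- a range sum of counter reads is a filter length
lemma range_sum_eq (sizes : List Int) (a b : Int) :
    (PySem.List.pyRange a b 1).foldl
        (fun acc k => acc + (PySem.Dict.counter sizes).getD k 0) 0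
      = ((sizes.filter (fun s => a ≤ s ∧ s < b)).length : Int) := by
  rw [foldl_add_map, zero_add]
  have h1 : (PySem.List.pyRange a b 1).map (fun k => (PySem.Dict.counter sizes).getD k 0)
      = (PySem.List.pyRange a b 1).map (fun k => (sizes.count k : Int)) := by
    apply List.map_congr_left; intro k _; exact PySem.Dict.getD_counter sizes k
  rw [h1, sum_count_mem _ _ (PySem.List.nodup_pyRange_one a b)]
  congr 1
  apply congrArg
  apply List.filter_congr
  intro s _
  simp [PySem.List.mem_pyRange_one]

-- the items sum with key > 1500 is the fragmented filter length
lemma items_sum_eq (sizes : List Int) :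
    (PySem.Dict.counter sizes).items.foldl
        (fun acc p => if p.1 > 1500 then acc + p.2 else acc) 0
      = ((sizes.filter (fun s => 1500 < s)).length : Int) := by
  rw [foldl_add_ite, zero_add, PySem.Dict.items_counter, List.map_map]
  have h : ((PySem.Set.ofList sizes).map
        ((fun p : Int × Int => if p.1 > 1500 then p.2 else 0) ∘ (fun k => (k, (sizes.count k : Int)))))
      = (PySem.Set.ofList sizes).map (fun k => if (1500 : Int) < k then (sizes.count k : Int) else 0) := by
    apply List.map_congr_left; intro k _; rfl
  rw [h]
  have := sum_count_filter (PySem.Set.ofList sizes) (fun k => decide ((1500:Int) < k)) sizes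
    (PySem.Set.nodup_ofList sizes) (by intro x hx; exact (PySem.Set.mem_ofList _ _).mpr hx)
  rw [← this]
  apply congrArg; apply List.map_congr_left; intro k _
  by_cases hk : (1500:Int) < k <;> simp [hk]

-- ===== VERDICT =====
theorem detect_mtu_patterns_py_spec : Claim_equal_detect_mtu_patterns_py := by
  intro sizes _
  unfold Spec_detect_mtu_patterns_py detect_mtu_patterns_py detect_mtu_patterns_py_alt
  split_ifs with h
  · rfl
  · simp only [freq_eq_counter, range_sum_eq, items_sum_eq]
    have e1 : sizes.filter (fun s => decide (1450 ≤ s ∧ s < 1501))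
        = sizes.filter (fun s => decide (1450 ≤ s ∧ s ≤ 1500)) := by
      apply List.filter_congr; intro s _; simp only [decide_eq_decide]; omega
    have e2 : sizes.filter (fun s => decide (1442 ≤ s ∧ s < 1493))
        = sizes.filter (fun s => decide (1442 ≤ s ∧ s ≤ 1492)) := by
      apply List.filter_congr; intro s _; simp only [decide_eq_decide]; omega
    rw [e1, e2]
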